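-- pv_equiv track=rewrite | github.com/AlanOgic/clorag | src/clorag/analysis/camera_extractor.py | clean_model_name
-- ===== SOURCE A (Python) =====
-- KNOWN_MANUFACTURERS = [
--     "Sony", "Canon", "Panasonic", "Blackmagic", "ARRI", "RED", "Grass Valley",
--     "Ikegami", "Hitachi", "JVC", "Fujifilm", "Nikon", "Z CAM", "Kinefinity",
--     "Ross", "AJA", "BMD", "GoPro", "DJI", "Atomos", "Marshall", "PTZOptics",
-- ]
--
-- def clean_model_name(model: str, manufacturer: str | None) -> str:
--     """Remove manufacturer prefix from model name if present.
--
--     Examples: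
--         clean_model_name("Sony HDC-5500", "Sony") -> "HDC-5500"
--         clean_model_name("HDC-5500", "Sony") -> "HDC-5500"
--         clean_model_name("Blackmagic URSA Mini", "Blackmagic") -> "URSA Mini"
--     """
--     if not model:
--         return model
--
--     model = model.strip()
--
--     # Remove known manufacturer prefixes
--     for mfr in KNOWN_MANUFACTURERS:
--         if model.lower().startswith(mfr.lower() + " "):
--             model = model[len(mfr):].strip()
--             break
--         # Also check with "Design" suffix (Blackmagic Design)
--         if model.lower().startswith(mfr.lower() + " design "):
--             model = model[len(mfr) + 8:].strip()
--             break
--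
--     # Also check the specific manufacturer if provided
--     if manufacturer:
--         if model.lower().startswith(manufacturer.lower() + " "):
--             model = model[len(manufacturer):].strip()
--
--     return model
-- ===== SOURCE B (Python) =====
-- KNOWN_MANUFACTURERS = [
--     "Sony", "Canon", "Panasonic", "Blackmagic", "ARRI", "RED", "Grass Valley",
--     "Ikegami", "Hitachi", "JVC", "Fujifilm", "Nikon", "Z CAM", "Kinefinity",
--     "Ross", "AJA", "BMD", "GoPro", "DJI", "Atomos", "Marshall", "PTZOptics",
-- ]
--
-- # No known manufacturer name (lowercased, followed by a space) is a prefix of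
-- # another, so a model can match at most one of them: instead of scanning the
-- # manufacturer list, scan the model's space positions and look the head up.
-- _PREFIXES = {m.lower() for m in KNOWN_MANUFACTURERS}
--
--
-- def clean_model_name(model: str, manufacturer: str | None) -> str:
--     """Remove manufacturer prefix from model name if present."""
--     if not model:
--         return model
--
--     model = model.strip()
--
--     low = model.lower()
--     for i, ch in enumerate(low):
--         if ch == " " and low[:i] in _PREFIXES:
--             model = model[i:].strip()
--             break
--
--     if manufacturer:
--         if model.lower().startswith(manufacturer.lower() + " "):
--             model = model[len(manufacturer):].strip()
--
--     return model
-- ===== Notes on version B (the rewrite author's own statement) =====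
-- stated objective: alternative
-- what changed: A scans the 22-entry KNOWN_MANUFACTURERS list testing each lowered name (plus a dead 'design' variant) as a prefix; B instead precomputes a set of lowered names once and makes a single left-to-right scan of the model's characters, hash-looking-up the head before each space (correct because no known prefix nests inside another).
import Mathlib
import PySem

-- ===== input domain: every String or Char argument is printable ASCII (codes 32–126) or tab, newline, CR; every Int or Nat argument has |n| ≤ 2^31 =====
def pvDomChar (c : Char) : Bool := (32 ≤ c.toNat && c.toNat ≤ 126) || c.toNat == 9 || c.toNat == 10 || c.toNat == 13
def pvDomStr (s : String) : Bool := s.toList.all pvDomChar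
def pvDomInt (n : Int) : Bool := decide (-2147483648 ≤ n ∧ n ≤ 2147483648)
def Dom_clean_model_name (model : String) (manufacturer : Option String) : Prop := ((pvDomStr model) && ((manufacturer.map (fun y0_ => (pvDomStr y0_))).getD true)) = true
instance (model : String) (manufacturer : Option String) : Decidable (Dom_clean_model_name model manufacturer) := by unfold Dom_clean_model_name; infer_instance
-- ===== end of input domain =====

-- B replaces A's linear scan over KNOWN_MANUFACTURERS (with its dead "design" branch)
-- by a single left-to-right scan of the model's space positions with a hash-set lookup
-- of the lowercased head; equivalence holds because no known prefix nests in another.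

def pvKML : List String :=
  ["Sony", "Canon", "Panasonic", "Blackmagic", "ARRI", "RED", "Grass Valley",
   "Ikegami", "Hitachi", "JVC", "Fujifilm", "Nikon", "Z CAM", "Kinefinity",
   "Ross", "AJA", "BMD", "GoPro", "DJI", "Atomos", "Marshall", "PTZOptics"]

-- ===== PORT A =====
-- A's `for mfr in KNOWN_MANUFACTURERS` loop with `break`
def pvLoopA (model : String) : List String → String
  | [] => model
  | mfr :: rest =>
    if PySem.Str.startswith (PySem.Str.lower model) (PySem.Str.lower mfr ++ " ") then
      PySem.Str.strip (PySem.Str.slice model (some (PySem.Str.len mfr)) none)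
    else if PySem.Str.startswith (PySem.Str.lower model) (PySem.Str.lower mfr ++ " design ") then
      PySem.Str.strip (PySem.Str.slice model (some (PySem.Str.len mfr + 8)) none)
    else pvLoopA model rest

def clean_model_name (model : String) (manufacturer : Option String) : String :=
  if model = "" then model
  else
    let m1 := PySem.Str.strip model
    let m2 := pvLoopA m1 pvKML
    match manufacturer with
    | none => m2
    | some mf =>
      if mf = "" then m2
      else if PySem.Str.startswith (PySem.Str.lower m2) (PySem.Str.lower mf ++ " ") then
        PySem.Str.strip (PySem.Str.slice m2 (some (PySem.Str.len mf)) none)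
      else m2

-- ===== PORT B =====
-- the module-level set comprehension {m.lower() for m in KNOWN_MANUFACTURERS}
def pvPrefixSet : PySem.Set String := PySem.Set.ofList (pvKML.map PySem.Str.lower)

-- B's `for i, ch in enumerate(low)` loop with `break` (a Python str iterates its chars)
def pvScanB (model : String) (low : String) : List (Int × Char) → String
  | [] => model
  | (i, ch) :: rest =>
    if ch == ' ' && PySem.Set.contains pvPrefixSet (PySem.Str.slice low none (some i)) then
      PySem.Str.strip (PySem.Str.slice model (some i) none)
    else pvScanB model low rest

def clean_model_name_alt (model : String) (manufacturer : Option String) : String :=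
  if model = "" then model
  else
    let m1 := PySem.Str.strip model
    let low := PySem.Str.lower m1
    let m2 := pvScanB m1 low (PySem.List.enumerate low.toList 0)
    match manufacturer with
    | none => m2
    | some mf =>
      if mf = "" then m2
      else if PySem.Str.startswith (PySem.Str.lower m2) (PySem.Str.lower mf ++ " ") then
        PySem.Str.strip (PySem.Str.slice m2 (some (PySem.Str.len mf)) none)
      else m2

-- ===== PRECONDITION & SPEC =====
def Spec_clean_model_name (model : String) (manufacturer : Option String) (out : String) : Prop := out = clean_model_name_alt model manufacturer
instance (model : String) (manufacturer : Option String) (out : String) : Decidable (Spec_clean_model_name model manufacturer out) := by unfold Spec_clean_model_name; infer_instance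

-- ===== CLAIM (what is proved, stated in full; the proofs are below) =====
def Claim_equal_clean_model_name : Prop := ∀ (model : String) (manufacturer : Option String), Dom_clean_model_name model manufacturer → Spec_clean_model_name model manufacturer (clean_model_name model manufacturer)

-- ===== LEMMAS AND PROOFS =====

-- A's second branch is dead: a "<mfr> design " prefix is in particular a "<mfr> " prefix
theorem pv_design_dead (s p : String) (h : ¬ PySem.Str.startswith s (p ++ " ") = true) :
    ¬ PySem.Str.startswith s (p ++ " design ") = true := by
  simp only [PySem.Str.startswith_eq, PySem.Chars.startswith_iff, String.toList_append] at *
  intro hpre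
  exact h (List.IsPrefix.trans ⟨"design ".toList, by simp⟩ hpre)

-- find? characterisation of A's loop
theorem pvLoopA_eq_find (model : String) (ms : List String) :
    pvLoopA model ms =
      match ms.find? (fun m => PySem.Str.startswith (PySem.Str.lower model) (PySem.Str.lower m ++ " ")) with
      | some m => PySem.Str.strip (PySem.Str.slice model (some (PySem.Str.len m)) none)
      | none => model := by
  induction ms with
  | nil => rfl
  | cons mfr rest ih =>
    by_cases h : PySem.Str.startswith (PySem.Str.lower model) (PySem.Str.lower mfr ++ " ") = true
    · rw [pvLoopA, if_pos h, List.find?_cons_of_pos (p := fun m => PySem.Str.startswith (PySem.Str.lower model) (PySem.Str.lower m ++ " ")) h]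
    · rw [pvLoopA, if_neg h, if_neg (pv_design_dead _ _ h), List.find?_cons_of_neg (p := fun m => PySem.Str.startswith (PySem.Str.lower model) (PySem.Str.lower m ++ " ")) h, ih]

-- find? characterisation of B's scan
theorem pvScanB_eq_find (model low : String) (l : List (Int × Char)) :
    pvScanB model low l =
      match l.find? (fun p => p.2 == ' ' && PySem.Set.contains pvPrefixSet (PySem.Str.slice low none (some p.1))) with
      | some (i, _) => PySem.Str.strip (PySem.Str.slice model (some i) none)
      | none => model := by
  induction l with
  | nil => rfl
  | cons p rest ih =>
    obtain ⟨i, ch⟩ := p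
    by_cases h : (ch == ' ' && PySem.Set.contains pvPrefixSet (PySem.Str.slice low none (some i))) = true
    · rw [pvScanB, if_pos h, List.find?_cons_of_pos (p := fun q => q.2 == ' ' && PySem.Set.contains pvPrefixSet (PySem.Str.slice low none (some q.1))) (a := (i, ch)) (by exact h)]
    · rw [pvScanB, if_neg h, List.find?_cons_of_neg (p := fun q => q.2 == ' ' && PySem.Set.contains pvPrefixSet (PySem.Str.slice low none (some q.1))) (a := (i, ch)) (by exact h), ih]

-- no lowered manufacturer prefix (with its trailing space) nests inside another
theorem pv_no_nest :
    (pvKML.all fun m => pvKML.all fun m' =>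
      (m == m') || !((PySem.Chars.lower m.toList ++ [' ']).isPrefixOf (PySem.Chars.lower m'.toList ++ [' ']))) = true := by
  decide

-- a list whose predicate holds at exactly one element finds that element
theorem pv_find?_unique {α : Type} {p : α → Bool} {l : List α} {x : α}
    (hx : x ∈ l) (hpx : p x = true) (huniq : ∀ y ∈ l, p y = true → y = x) :
    l.find? p = some x := by
  induction l with
  | nil => cases hx
  | cons a rest ih =>
    by_cases ha : p a = true
    · simp [List.find?, huniq a (List.mem_cons_self) ha, hpx]
    · have hxr : x ∈ rest := by
        cases hx with
        | head => exact absurd hpx ha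
        | tail _ h => exact h
      simp [List.find?, ha, ih hxr (fun y hy => huniq y (List.mem_cons_of_mem _ hy))]

theorem pv_prefix_snoc {p l : List Char} {c : Char} :
    (p ++ [c]) <+: l ↔ l.take p.length = p ∧ l[p.length]? = some c := by
  constructor
  · rintro ⟨t, ht⟩
    subst ht
    rw [List.append_assoc]
    constructor
    · exact List.take_left
    · rw [List.getElem?_append_right (Nat.le_refl _)]
      simp
  · rintro ⟨h1, h2⟩
    obtain ⟨hlt, hget⟩ := List.getElem?_eq_some_iff.mp h2
    refine ⟨l.drop (p.length + 1), ?_⟩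
    conv_rhs => rw [← List.take_append_drop (p.length + 1) l]
    rw [List.take_succ_eq_append_getElem hlt, h1, hget, List.append_assoc]

-- prefix matching in String form, moved to the List Char side
theorem pv_sw_iff (m1 m : String) :
    PySem.Str.startswith (PySem.Str.lower m1) (PySem.Str.lower m ++ " ") = true ↔
      (PySem.Chars.lower m.toList ++ [' ']) <+: PySem.Chars.lower m1.toList := by
  simp [PySem.Str.startswith_eq, PySem.Chars.startswith_iff, String.toList_append]

theorem pv_len_lower (l : List Char) : (PySem.Chars.lower l).length = l.length := by
  simp [PySem.Chars.lower]

-- every B-scan hit comes from a manufacturer match, at its exact cut position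
theorem pv_hit_to_match {m1 : String} {i : Int} {ch : Char}
    (hmem : (i, ch) ∈ PySem.List.enumerate (PySem.Str.lower m1).toList 0)
    (hhit : (ch == ' ' && PySem.Set.contains pvPrefixSet (PySem.Str.slice (PySem.Str.lower m1) none (some i))) = true) :
    ∃ m ∈ pvKML, PySem.Str.startswith (PySem.Str.lower m1) (PySem.Str.lower m ++ " ") = true
      ∧ i = PySem.Str.len m ∧ ch = ' ' := by
  obtain ⟨k, hk, hp⟩ := (PySem.List.mem_enumerate_iff _ _ _).mp hmem
  obtain ⟨hi, hch⟩ := Prod.mk.injEq .. ▸ hp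
  rw [Bool.and_eq_true, beq_iff_eq] at hhit
  obtain ⟨hsp, hcon⟩ := hhit
  have hmem' := (PySem.Set.contains_iff _ _).mp hcon
  rw [pvPrefixSet, PySem.Set.mem_ofList, List.mem_map] at hmem'
  obtain ⟨m, hm, hsl⟩ := hmem'
  have hi' : i = (k : Int) := by rw [hi]; ring
  have htake : (PySem.Chars.lower m1.toList).take k = PySem.Chars.lower m.toList := by
    have h0 := congrArg String.toList hsl
    rw [PySem.Str.toList_slice, PySem.Chars.slice_eq_listSlice, hi',
      PySem.List.slice_to_natCast, PySem.Str.toList_lower, PySem.Str.toList_lower] at h0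
    exact h0.symm
  have hk2 := hk
  have hlen : (PySem.Chars.lower m.toList).length = k := by
    rw [← htake, List.length_take]
    simp [PySem.Str.toList_lower, pv_len_lower] at hk ⊢
    omega
  refine ⟨m, hm, ?_, ?_, hsp⟩
  · rw [pv_sw_iff, pv_prefix_snoc, hlen]
    refine ⟨htake, ?_⟩
    rw [← PySem.Str.toList_lower, List.getElem?_eq_getElem hk2, hch.symm.trans hsp]
  · rw [hi', PySem.Str.len_eq]
    have : m.toList.length = k := by rw [← pv_len_lower m.toList, hlen]
    omega

-- every manufacturer match is a B-scan hit at position len(m), with a space there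
theorem pv_match_to_hit {m1 : String} {m : String} (hm : m ∈ pvKML)
    (hpre : PySem.Str.startswith (PySem.Str.lower m1) (PySem.Str.lower m ++ " ") = true) :
    (PySem.Str.len m, ' ') ∈ PySem.List.enumerate (PySem.Str.lower m1).toList 0
      ∧ ((' ' == ' ') && PySem.Set.contains pvPrefixSet (PySem.Str.slice (PySem.Str.lower m1) none (some (PySem.Str.len m)))) = true := by
  rw [pv_sw_iff, pv_prefix_snoc] at hpre
  obtain ⟨htake, hget⟩ := hpre
  obtain ⟨hk, hgetk⟩ := List.getElem?_eq_some_iff.mp hget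
  have hlen : (PySem.Chars.lower m.toList).length = m.toList.length := pv_len_lower _
  constructor
  · rw [PySem.List.mem_enumerate_iff]
    have hk' : m.toList.length < (PySem.Str.lower m1).toList.length := by
      rw [PySem.Str.toList_lower, ← hlen]; exact hk
    refine ⟨m.toList.length, hk', ?_⟩
    have hget' : (PySem.Str.lower m1).toList[m.toList.length]? = some ' ' := by
      rw [PySem.Str.toList_lower, ← hlen]; exact hget
    obtain ⟨hh, hg⟩ := List.getElem?_eq_some_iff.mp hget'
    rw [Prod.mk.injEq]
    exact ⟨by rw [PySem.Str.len_eq]; omega, hg.symm⟩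
  · rw [Bool.and_eq_true, beq_iff_eq]
    refine ⟨rfl, (PySem.Set.contains_iff _ _).mpr ?_⟩
    rw [pvPrefixSet, PySem.Set.mem_ofList, List.mem_map]
    refine ⟨m, hm, ?_⟩
    apply String.toList_inj.mp
    rw [PySem.Str.toList_slice, PySem.Chars.slice_eq_listSlice, PySem.Str.len_eq,
      PySem.List.slice_to_natCast, PySem.Str.toList_lower, PySem.Str.toList_lower]
    rw [← hlen]
    exact htake.symm

-- at most one manufacturer matches
theorem pv_match_unique {m1 : String} {m m' : String} (hm : m ∈ pvKML) (hm' : m' ∈ pvKML)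
    (h : PySem.Str.startswith (PySem.Str.lower m1) (PySem.Str.lower m ++ " ") = true)
    (h' : PySem.Str.startswith (PySem.Str.lower m1) (PySem.Str.lower m' ++ " ") = true) :
    m = m' := by
  rw [pv_sw_iff] at h h'
  have key : ∀ a ∈ pvKML, ∀ b ∈ pvKML,
      (PySem.Chars.lower a.toList ++ [' ']) <+: (PySem.Chars.lower b.toList ++ [' ']) → a = b := by
    intro a ha b hb hab
    have h1 := List.all_eq_true.mp pv_no_nest a ha
    have h2 := List.all_eq_true.mp h1 b hb
    rw [Bool.or_eq_true, beq_iff_eq, Bool.not_eq_true', Bool.eq_false_iff] at h2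
    rcases h2 with h2 | h2
    · exact h2
    · exact absurd (List.isPrefixOf_iff_prefix.mpr hab) h2
  rcases Nat.le_total (PySem.Chars.lower m.toList ++ [' ']).length (PySem.Chars.lower m'.toList ++ [' ']).length with hle | hle
  · exact key m hm m' hm' (List.prefix_of_prefix_length_le h h' hle)
  · exact (key m' hm' m hm (List.prefix_of_prefix_length_le h' h hle)).symm

-- phase-1 equality: B's space scan returns exactly what A's manufacturer loop returns
theorem pv_phase1 (m1 : String) :
    pvScanB m1 (PySem.Str.lower m1) (PySem.List.enumerate (PySem.Str.lower m1).toList 0) =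
      pvLoopA m1 pvKML := by
  rw [pvLoopA_eq_find, pvScanB_eq_find]
  cases hf : pvKML.find? (fun m => PySem.Str.startswith (PySem.Str.lower m1) (PySem.Str.lower m ++ " ")) with
  | none =>
    have hnone := List.find?_eq_none.mp hf
    have : (PySem.List.enumerate (PySem.Str.lower m1).toList 0).find?
        (fun q => q.2 == ' ' && PySem.Set.contains pvPrefixSet (PySem.Str.slice (PySem.Str.lower m1) none (some q.1))) = none := by
      rw [List.find?_eq_none]
      rintro ⟨i, ch⟩ hmem hhit
      obtain ⟨m, hm, hsw, -, -⟩ := pv_hit_to_match hmem hhit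
      exact hnone m hm hsw
    rw [this]
  | some m =>
    have hm : m ∈ pvKML := List.mem_of_find?_eq_some hf
    have hsw : PySem.Str.startswith (PySem.Str.lower m1) (PySem.Str.lower m ++ " ") = true :=
      List.find?_some (p := fun m => PySem.Str.startswith (PySem.Str.lower m1) (PySem.Str.lower m ++ " ")) hf
    obtain ⟨hmem, hhit⟩ := pv_match_to_hit hm hsw
    have : (PySem.List.enumerate (PySem.Str.lower m1).toList 0).find?
        (fun q => q.2 == ' ' && PySem.Set.contains pvPrefixSet (PySem.Str.slice (PySem.Str.lower m1) none (some q.1))) =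
        some (PySem.Str.len m, ' ') := by
      apply pv_find?_unique hmem (by exact hhit)
      rintro ⟨i, ch⟩ hmem' hhit'
      obtain ⟨m', hm', hsw', hi, hch⟩ := pv_hit_to_match hmem' (by exact hhit')
      have : m' = m := pv_match_unique hm' hm hsw' hsw
      rw [Prod.mk.injEq]
      exact ⟨by rw [hi, this], hch⟩
    rw [this]

-- ===== VERDICT (by name: the statement is the Claim_ definition above) =====
theorem clean_model_name_spec : Claim_equal_clean_model_name := by
  intro model manufacturer _
  unfold Spec_clean_model_name clean_model_name clean_model_name_alt
  by_cases hm : model = ""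
  · simp [hm]
  · simp only [hm, if_false]
    rw [pv_phase1]
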